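-- pv_equiv track=rewrite | github.com/drsm79/oscal-view | static.py | schema_list_links
-- ===== SOURCE A (Python) =====
-- def schema_list_links(schema_list):
--     s = ''
--     for i, item in enumerate(schema_list, 1):
--         if i == len(schema_list) and i > 1:
--             s = s.strip(', ')
--             s += ' & '
--         s += f'[{item}]({item}.html), '
--
--     return s.strip(', ')
-- ===== SOURCE B (Python) =====
-- def schema_list_links(schema_list):
--     links = [f'[{x}]({x}.html)' for x in schema_list]
--     if not links:
--         return ''
--     if len(links) == 1:
--         return links[0]
--     return ', '.join(links[:-1]) + ' & ' + links[-1]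
-- ===== Notes on version B (the rewrite author's own statement) =====
-- stated objective: simpler
-- what changed: Replaces A's incremental append-then-strip-and-reinsert-'&' accumulator loop with a two-phase build: format all links first, then return '' / the single link / ', '.join of all but the last plus ' & ' plus the last.
import Mathlib
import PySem

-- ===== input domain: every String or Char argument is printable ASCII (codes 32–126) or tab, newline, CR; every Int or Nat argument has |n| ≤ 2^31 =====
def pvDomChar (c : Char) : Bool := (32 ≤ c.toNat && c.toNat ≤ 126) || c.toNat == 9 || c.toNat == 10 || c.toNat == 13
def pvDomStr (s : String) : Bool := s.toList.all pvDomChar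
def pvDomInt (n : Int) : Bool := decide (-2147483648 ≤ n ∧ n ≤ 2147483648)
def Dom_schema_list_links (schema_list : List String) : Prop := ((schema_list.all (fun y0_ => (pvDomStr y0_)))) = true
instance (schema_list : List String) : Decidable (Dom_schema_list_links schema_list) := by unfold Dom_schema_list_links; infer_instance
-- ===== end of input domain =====

-- B builds the list of link strings first and joins it in one step, instead of A's
-- append-then-strip-and-reinsert-'&' accumulator loop; same return value, no speed claim.

-- ===== PORT A =====
-- A works on code points: each Python string concatenation is List Char append,
-- s.strip(', ') is PySem.Chars.stripChars (exact).
def schema_list_links (schema_list : List String) : String :=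
  let s : List Char :=
    (PySem.List.enumerate schema_list 1).foldl
      (fun s p =>
        let s := if p.1 = PySem.List.len schema_list ∧ 1 < p.1
                   then PySem.Chars.stripChars s [',', ' '] ++ " & ".toList
                   else s
        s ++ "[".toList ++ p.2.toList ++ "](".toList ++ p.2.toList ++ ".html), ".toList)
      []
  String.mk (PySem.Chars.stripChars s [',', ' '])

-- ===== PORT B =====
-- f'[{x}]({x}.html)' on code points
def pvLink (x : String) : List Char :=
  "[".toList ++ x.toList ++ "](".toList ++ x.toList ++ ".html)".toList

def schema_list_links_alt (schema_list : List String) : String :=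
  match schema_list.map pvLink with
  | [] => ""
  | [l] => String.mk l
  | l :: l2 :: ls =>
      String.mk (PySem.Chars.join ", ".toList ((l :: l2 :: ls).dropLast)
                 ++ " & ".toList ++ (l2 :: ls).getLast (by simp))

-- ===== PRECONDITION & SPEC =====
def Spec_schema_list_links (schema_list : List String) (out : String) : Prop := out = schema_list_links_alt schema_list
instance (schema_list : List String) (out : String) : Decidable (Spec_schema_list_links schema_list out) := by unfold Spec_schema_list_links; infer_instance

-- ===== CLAIM (what is proved, stated in full; the proofs are below) =====
def Claim_equal_schema_list_links : Prop := ∀ (schema_list : List String), Dom_schema_list_links schema_list → Spec_schema_list_links schema_list (schema_list_links schema_list)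

-- ===== LEMMAS AND PROOFS =====

-- a char list that starts with '[' and ends with ')' (links and their joins)
def pvOk (m : List Char) : Prop := m.head? = some '[' ∧ m.getLast? = some ')'

theorem pvOk_link (x : String) : pvOk (pvLink x) := by
  constructor
  · simp [pvLink]
  · have h : pvLink x = ("[".toList ++ x.toList ++ "](".toList ++ x.toList
        ++ ".html".toList) ++ [')'] := by simp [pvLink]
    rw [h, List.getLast?_concat]

theorem pvOk_glue {a b : List Char} (c : List Char) (ha : pvOk a) (hb : pvOk b) :
    pvOk (a ++ c ++ b) := by
  obtain ⟨ha1, ha2⟩ := ha; obtain ⟨hb1, hb2⟩ := hb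
  constructor
  · cases a with
    | nil => simp at ha1
    | cons x t => simp at ha1 ⊢; exact ha1
  · simp [List.getLast?_append, hb2]

theorem pvOk_join (f : List Char) (r : List (List Char))
    (hf : pvOk f) (hr : ∀ m ∈ r, pvOk m) :
    pvOk (PySem.Chars.join ", ".toList (f :: r)) := by
  induction r generalizing f with
  | nil => rw [PySem.Chars.join_singleton]; exact hf
  | cons q t ih =>
      rw [PySem.Chars.join_cons_cons]
      have hrest : pvOk (PySem.Chars.join ", ".toList (q :: t)) :=
        ih q (hr q (by simp)) (fun m hm => hr m (by simp [hm]))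
      exact pvOk_glue _ hf hrest

-- the final/inner strip removes exactly the trailing ", " of an ok-string
theorem pvStrip_ok {m : List Char} (h : pvOk m) :
    PySem.Chars.stripChars (m ++ [',', ' ']) [',', ' '] = m := by
  obtain ⟨h1, h2⟩ := h
  cases m with
  | nil => simp at h1
  | cons x t =>
      simp at h1; subst h1
      have hrev : ('[' :: t).reverse.head? = some ')' := by
        rw [List.head?_reverse]; exact h2
      simp only [PySem.Chars.stripChars]
      rw [List.cons_append, List.dropWhile_cons]
      simp only [show ([',',' '] : List Char).contains '[' = false from rfl,
                 Bool.false_eq_true, if_false]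
      rw [show ('[' :: (t ++ [',',' '])).reverse = ' ' :: ',' :: ('['::t).reverse by simp]
      rw [List.dropWhile_cons, List.dropWhile_cons]
      simp only [show ([',',' '] : List Char).contains ' ' = true from rfl,
                 show ([',',' '] : List Char).contains ',' = true from rfl, if_true]
      cases hc : ('[' :: t).reverse with
      | nil => simp [hc] at hrev
      | cons y r =>
          rw [hc] at hrev; simp at hrev; subst hrev
          rw [List.dropWhile_cons]
          simp only [show ([',',' '] : List Char).contains ')' = false from rfl,
                     Bool.false_eq_true, if_false]
          rw [← hc, List.reverse_reverse]

-- the accumulator after all non-final iterations: links with ", " glued after each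
theorem pvFold_prefix (L : Int) (xs : List String) (k : Int) (s0 : List Char)
    (hk : 1 ≤ k) (hL : k + xs.length ≤ L) :
    (PySem.List.enumerate xs k).foldl
      (fun s p =>
        (if p.1 = L ∧ 1 < p.1
           then PySem.Chars.stripChars s [',', ' '] ++ " & ".toList
           else s)
        ++ "[".toList ++ p.2.toList ++ "](".toList ++ p.2.toList ++ ".html), ".toList)
      s0
    = s0 ++ (xs.map (fun y => pvLink y ++ [',', ' '])).flatten := by
  induction xs generalizing k s0 with
  | nil => simp [PySem.List.enumerate]
  | cons y t ih =>
      rw [PySem.List.enumerate_cons, List.foldl_cons]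
      have hkL : ¬ (k = L ∧ 1 < k) := by
        rintro ⟨rfl, _⟩
        simp only [List.length_cons] at hL
        omega
      rw [if_neg hkL]
      rw [ih (k + 1) _ (by omega) (by simp at hL ⊢; omega)]
      simp [pvLink]

-- flatten of "link ++ ', '" over a nonempty list = join ", " of links, then ", "
theorem pvFlatten_eq_join (f : String) (r : List String) :
    ((f :: r).map (fun y => pvLink y ++ [',', ' '])).flatten
      = PySem.Chars.join ", ".toList ((f :: r).map pvLink) ++ [',', ' '] := by
  induction r generalizing f with
  | nil => simp [PySem.Chars.join_singleton]
  | cons q t ih =>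
      simp only [List.map_cons, List.flatten_cons]
      rw [PySem.Chars.join_cons_cons]
      have := ih q
      simp only [List.map_cons, List.flatten_cons] at this
      rw [this]
      simp [show (", ".toList : List Char) = [',', ' '] from rfl]

theorem pvAll_ok_map (r : List String) : ∀ m ∈ r.map pvLink, pvOk m := by
  intro m hm
  simp only [List.mem_map] at hm
  obtain ⟨x, _, rfl⟩ := hm
  exact pvOk_link x

-- ===== VERDICT (by name: the statement is the Claim_ definition above) =====
theorem schema_list_links_spec : Claim_equal_schema_list_links := by
  intro xs _
  show schema_list_links xs = schema_list_links_alt xs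
  rcases List.eq_nil_or_concat xs with rfl | ⟨front, l, h⟩
  · rfl
  · rw [List.concat_eq_append] at h; subst h
    cases front with
    | nil =>
        -- single element: no '&' branch, strip removes the trailing ", "
        simp only [schema_list_links, schema_list_links_alt, List.nil_append]
        rw [PySem.List.enumerate_cons]
        simp only [PySem.List.enumerate_nil, List.foldl_cons, List.foldl_nil]
        rw [if_neg (by simp)]
        simp only [List.nil_append, List.map_cons, List.map_nil]
        have h1 : ("[".toList ++ l.toList ++ "](".toList ++ l.toList ++ ".html), ".toList : List Char)
            = pvLink l ++ [',', ' '] := by simp [pvLink]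
        rw [h1, pvStrip_ok (pvOk_link l)]
    | cons f r =>
        -- ≥ 2 elements
        simp only [schema_list_links, schema_list_links_alt]
        rw [PySem.List.enumerate_append, List.foldl_append]
        have hlen : PySem.List.len ((f :: r) ++ [l]) = ((f :: r).length : Int) + 1 := by
          simp [PySem.List.len]
        rw [pvFold_prefix (PySem.List.len ((f :: r) ++ [l])) (f :: r) 1 []
              (by omega) (by rw [hlen]; omega)]
        rw [PySem.List.enumerate_cons, PySem.List.enumerate_nil,
            List.foldl_cons, List.foldl_nil]
        have hM : pvOk (PySem.Chars.join ", ".toList ((f :: r).map pvLink)) := by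
          simpa using pvOk_join (pvLink f) (r.map pvLink) (pvOk_link f)
            (pvAll_ok_map r)
        rw [List.nil_append, pvFlatten_eq_join f r,
            if_pos (by constructor <;> [rw [hlen]; skip] <;> simp [hlen] <;> omega),
            pvStrip_ok hM]
        set M := PySem.Chars.join ", ".toList ((f :: r).map pvLink) with hMdef
        have h2 : (M ++ " & ".toList ++ "[".toList ++ l.toList ++ "](".toList
              ++ l.toList ++ ".html), ".toList : List Char)
            = (M ++ " & ".toList ++ pvLink l) ++ [',', ' '] := by simp [pvLink]
        rw [h2, pvStrip_ok (pvOk_glue " & ".toList hM (pvOk_link l))]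
        -- match the B side
        have hmap : ((f :: r) ++ [l]).map pvLink
            = pvLink f :: (r.map pvLink ++ [pvLink l]) := by simp
        cases r with
        | nil => simp [PySem.Chars.join_singleton, hMdef]
        | cons q t =>
            simp only [List.map_cons, List.map_append, List.map_cons, List.map_nil]
            have hdrop : ((pvLink f :: pvLink q :: (t.map pvLink ++ [pvLink l])).dropLast)
                = pvLink f :: pvLink q :: t.map pvLink := by
              rw [show pvLink f :: pvLink q :: (t.map pvLink ++ [pvLink l])
                    = (pvLink f :: pvLink q :: t.map pvLink) ++ [pvLink l] from rfl,
                  List.dropLast_concat]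
            have hlast : (pvLink q :: (t.map pvLink ++ [pvLink l])).getLast (by simp)
                = pvLink l := by
              rw [List.getLast_eq_iff_getLast?_eq_some, List.getLast?_cons,
                  List.getLast?_append]
              simp
            simp only [List.cons_append, hdrop, hlast, hMdef]
            simp
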